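-- pv_equiv track=rewrite | github.com/antsago/tissai | packages/indexer/src/trainer/LlmLabeler/utils.py | getFirstWord
-- ===== SOURCE A (Python) =====
-- import string
-- from functools import reduce
--
-- def getFirstWord(generatedText):
--     firstSentence = generatedText.split("\n")[0]
--     words = [w for w in firstSentence.split(" ") if w and not w.isspace()]
--     firstWord = words[0] if len(words) > 0 else ""
--     return reduce(
--         lambda word, punctuation: word.replace(punctuation, ""),
--         string.punctuation,
--         firstWord,
--     )
-- ===== SOURCE B (Python) =====
-- import string
--
--
-- def getFirstWord(generatedText):
--     punct = set(string.punctuation)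
--     token = []
--     has_content = False
--     for c in generatedText:
--         if c == "\n":
--             break
--         if c == " ":
--             if has_content:
--                 break
--             token = []
--         else:
--             token.append(c)
--             if not c.isspace():
--                 has_content = True
--     if not has_content:
--         return ""
--     return "".join(ch for ch in token if ch not in punct)
-- ===== Notes on version B (the rewrite author's own statement) =====
-- stated objective: alternative
-- what changed: B replaces A's split-into-lines / split-into-words / filter / index / 32-pass reduce-of-replace pipeline by a single left-to-right character scan with a token accumulator and a has-content flag (stopping at the first newline or at the space ending the first real word), followed by one character-filter pass against a prebuilt punctuation set.
import Mathlib
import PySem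

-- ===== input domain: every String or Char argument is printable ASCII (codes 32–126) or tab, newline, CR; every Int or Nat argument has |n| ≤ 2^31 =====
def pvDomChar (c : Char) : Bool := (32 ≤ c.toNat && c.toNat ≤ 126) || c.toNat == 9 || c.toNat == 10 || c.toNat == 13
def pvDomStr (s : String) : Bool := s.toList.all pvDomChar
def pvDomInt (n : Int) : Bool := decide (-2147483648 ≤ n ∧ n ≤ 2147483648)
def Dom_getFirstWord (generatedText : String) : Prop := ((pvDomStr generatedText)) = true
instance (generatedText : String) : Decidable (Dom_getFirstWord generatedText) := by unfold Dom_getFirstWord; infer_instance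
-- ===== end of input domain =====

-- B replaces A's split/filter/index + 32-pass reduce-of-replace pipeline by ONE left-to-right
-- character scan (token accumulator + has-content flag, stopping at the first newline or the
-- space ending the first real word) followed by one punctuation-set filter pass (alternative).

-- string.punctuation, the stdlib constant both Pythons read
def pvPunctuation : List Char := "!\"#$%&'()*+,-./:;<=>?@[\\]^_`{|}~".toList

-- ===== PORT A =====
def getFirstWord (generatedText : String) : String :=
  -- split("\n")[0]: split? is some (sep ≠ "") and the result list is never empty, so [0] never raises
  let firstSentence := ((PySem.Str.split? generatedText "\n").getD []).headD ""
  let words := ((PySem.Str.split? firstSentence " ").getD []).filter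
      (fun w => !(w == "") && !(PySem.Str.strIsspace w))
  let firstWord := if words.length > 0 then (PySem.List.pyGet? words 0).getD "" else ""
  pvPunctuation.foldl (fun word p => PySem.Str.replace word (String.ofList [p]) "") firstWord

-- ===== PORT B =====
def pvPunctSet : PySem.Set Char := PySem.Set.ofList pvPunctuation

-- the for-loop of Source B: walk the characters, accumulating the current token and the
-- has-content flag, stopping at '\n' or at a space once the token has real content
def pvScanFirstWord : List Char → List Char → Bool → List Char × Bool
  | [], token, hasContent => (token, hasContent)
  | c :: rest, token, hasContent =>
    if c == '\n' then (token, hasContent)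
    else if c == ' ' then
      if hasContent then (token, hasContent) else pvScanFirstWord rest [] hasContent
    else pvScanFirstWord rest (token ++ [c]) (hasContent || !(PySem.Chars.isspace c))

def getFirstWord_alt (generatedText : String) : String :=
  let r := pvScanFirstWord generatedText.toList [] false
  if r.2 then String.ofList (r.1.filter (fun ch => !(PySem.Set.contains pvPunctSet ch)))
  else ""

-- ===== PRECONDITION & SPEC =====
def Spec_getFirstWord (generatedText : String) (out : String) : Prop := out = getFirstWord_alt generatedText
instance (generatedText : String) (out : String) : Decidable (Spec_getFirstWord generatedText out) := by unfold Spec_getFirstWord; infer_instance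

-- ===== CLAIM (what is proved, stated in full; the proofs are below) =====
def Claim_equal_getFirstWord : Prop := ∀ (generatedText : String), Dom_getFirstWord generatedText → Spec_getFirstWord generatedText (getFirstWord generatedText)

-- ===== LEMMAS AND PROOFS =====

-- word test of A, on the char-list side
def pvIsWord (w : List Char) : Bool := !w.isEmpty && !(PySem.Chars.strIsspace w)

lemma pvIsWord_eq_any (w : List Char) :
    pvIsWord w = w.any (fun c => !(PySem.Chars.isspace c)) := by
  cases w with
  | nil => rfl
  | cons a t => simp [pvIsWord, PySem.Chars.strIsspace, List.all_eq_not_any_not]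

-- PySem's fuel-based splitOn with a single-character separator is List.splitOnP
lemma pv_modifyHead_id (l : List (List Char)) :
    List.modifyHead (fun x : List Char => x) l = l := by
  cases l <;> rfl

lemma splitOn_go_single (p : Char) : ∀ (fuel : Nat) (l cur : List Char) (acc : List (List Char)),
    l.length ≤ fuel →
    PySem.Chars.splitOn.go [p] fuel l cur acc
      = acc.reverse ++ List.modifyHead (cur.reverse ++ ·) (List.splitOnP (fun c => c == p) l) := by
  intro fuel
  induction fuel with
  | zero =>
    intro l cur acc hl
    have : l = [] := by cases l <;> simp_all
    subst this
    simp [PySem.Chars.splitOn.go]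
  | succ n ih =>
    intro l cur acc hl
    cases l with
    | nil => simp [PySem.Chars.splitOn.go]
    | cons c rest =>
      rw [PySem.Chars.splitOn.go.eq_def]
      by_cases h : c = p
      · subst h
        simp only [List.isPrefixOf, beq_self_eq_true, Bool.true_and,
          if_pos, List.length_cons, List.length_nil, List.drop_succ_cons, List.drop_zero]
        rw [ih rest [] (cur.reverse :: acc) (by simpa using Nat.le_of_succ_le_succ hl)]
        simp [List.splitOnP_cons, pv_modifyHead_id]
      · have hb : (c == p) = false := by simp [h]
        have hb2 : (p == c) = false := by simp [Ne.symm h]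
        simp only [List.isPrefixOf, hb2, Bool.false_and, if_neg, Bool.false_eq_true,
          not_false_eq_true]
        rw [ih rest (c :: cur) acc (by simpa using Nat.le_of_succ_le_succ hl)]
        rw [List.splitOnP_cons]
        simp only [hb, if_neg, Bool.false_eq_true, not_false_eq_true]
        cases hS : List.splitOnP (fun c => c == p) rest with
        | nil => simp
        | cons hd tl => simp

lemma splitOn_single (p : Char) (l : List Char) :
    PySem.Chars.splitOn l [p] = List.splitOnP (fun c => c == p) l := by
  rw [PySem.Chars.splitOn, splitOn_go_single p (l.length + 1) l [] [] (by omega)]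
  simp [pv_modifyHead_id]

lemma splitOnP_headD (q : Char → Bool) (l : List Char) :
    (List.splitOnP q l).headD [] = l.takeWhile (fun c => !(q c)) := by
  induction l with
  | nil => simp
  | cons c rest ih =>
    rw [List.splitOnP_cons]
    by_cases h : q c = true
    · simp [h]
    · have hb : q c = false := by simp_all
      cases hS : List.splitOnP q rest with
      | nil => exact absurd hS (List.splitOnP_ne_nil q rest)
      | cons hd tl =>
        simp only [List.modifyHead, List.takeWhile_cons, hb]
        simpa [hS] using ih

-- the scan never reads past the first '\n'
lemma scan_takeWhile : ∀ (l token : List Char) (b : Bool),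
    pvScanFirstWord l token b
      = pvScanFirstWord (l.takeWhile (fun c => !(c == '\n'))) token b := by
  intro l
  induction l with
  | nil => intro token b; rfl
  | cons c rest ih =>
    intro token b
    by_cases h : c = '\n'
    · subst h; simp [pvScanFirstWord]
    · have hb : (c == '\n') = false := by simp [h]
      simp only [List.takeWhile_cons, hb, Bool.not_false, if_pos]
      by_cases hs : c = ' '
      · subst hs; cases b <;> simp [pvScanFirstWord, ih]
      · have hs' : (c == ' ') = false := by simp [hs]
        simp [pvScanFirstWord, hb, hs', ih]

-- the scan over a newline-free line computes A's first real space-separated token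
lemma scan_spec : ∀ (line token : List Char), '\n' ∉ line →
    (if (pvScanFirstWord line token (token.any (fun c => !(PySem.Chars.isspace c)))).2
     then (pvScanFirstWord line token (token.any (fun c => !(PySem.Chars.isspace c)))).1
     else [])
    = ((List.modifyHead (token ++ ·) (List.splitOnP (fun c => c == ' ') line)).find? pvIsWord).getD [] := by
  intro line
  induction line with
  | nil =>
    intro token _
    simp only [pvScanFirstWord, List.splitOnP_nil, List.modifyHead, List.append_nil,
      List.find?_cons]
    rw [← pvIsWord_eq_any]
    cases h : pvIsWord token <;> simp
  | cons c rest ih =>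
    intro token hnl
    have hc : c ≠ '\n' := by intro h; exact hnl (h ▸ List.mem_cons_self)
    have hrest : '\n' ∉ rest := fun h => hnl (List.mem_cons_of_mem _ h)
    have hcb : (c == '\n') = false := by simp [hc]
    by_cases hs : c = ' '
    · subst hs
      rw [List.splitOnP_cons]
      simp only [beq_self_eq_true, if_pos, List.modifyHead, List.append_nil, List.find?_cons]
      by_cases h : token.any (fun c => !(PySem.Chars.isspace c)) = true
      · have hw : pvIsWord token = true := by rw [pvIsWord_eq_any]; exact h
        simp [pvScanFirstWord, h, hw]
      · have hb : token.any (fun c => !(PySem.Chars.isspace c)) = false := by simp_all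
        have hw : pvIsWord token = false := by rw [pvIsWord_eq_any]; exact hb
        simp only [pvScanFirstWord, hcb, Bool.false_eq_true, if_neg, not_false_eq_true,
          beq_self_eq_true, if_pos, hb, hw]
        have := ih [] hrest
        simpa [pv_modifyHead_id] using this
    · have hsb : (c == ' ') = false := by simp [hs]
      have hstep :
          pvScanFirstWord (c :: rest) token (token.any (fun x => !(PySem.Chars.isspace x)))
            = pvScanFirstWord rest (token ++ [c])
                ((token ++ [c]).any (fun x => !(PySem.Chars.isspace x))) := by
        simp [pvScanFirstWord, hcb, hsb, List.any_append]
      rw [hstep, ih (token ++ [c]) hrest, List.splitOnP_cons]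
      simp only [hsb, Bool.false_eq_true, if_neg, not_false_eq_true]
      cases hS : List.splitOnP (fun c => c == ' ') rest with
      | nil => exact absurd hS (List.splitOnP_ne_nil _ rest)
      | cons hd tl => simp

-- ===== punctuation: A's reduce of replaces is one filter =====
lemma replace_go_single (p : Char) : ∀ (l acc : List Char),
    PySem.Chars.replace.go [p] [] l.length l acc = acc.reverse ++ l.filter (fun c => !(c == p)) := by
  intro l
  induction l with
  | nil => intro acc; simp [PySem.Chars.replace.go]
  | cons c t ih =>
    intro acc
    rw [PySem.Chars.replace.go.eq_def]
    by_cases h : c = p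
    · subst h
      simp [List.isPrefixOf, ih]
    · have hb : (c == p) = false := by simp [h]
      simp [List.isPrefixOf, hb, ih, Ne.symm h]

lemma replace_single (p : Char) (cs : List Char) :
    PySem.Chars.replace cs [p] [] = cs.filter (fun c => !(c == p)) := by
  rw [PySem.Chars.replace]
  simp [replace_go_single]

lemma foldl_replace_eq_filter (ps : List Char) : ∀ (cs : List Char),
    ps.foldl (fun w p => PySem.Chars.replace w [p] []) cs
      = cs.filter (fun c => !(ps.contains c)) := by
  induction ps with
  | nil => intro cs; simp
  | cons q rest ih =>
    intro cs
    rw [List.foldl_cons, ih, replace_single, List.filter_filter]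
    apply List.filter_congr
    intro c _
    by_cases h : c = q <;> by_cases h2 : c ∈ rest <;> simp [h, h2]

lemma foldl_strReplace (ps : List Char) : ∀ (s : String),
    (ps.foldl (fun word p => PySem.Str.replace word (String.ofList [p]) "") s).toList
      = ps.foldl (fun cs p => PySem.Chars.replace cs [p] []) s.toList := by
  induction ps with
  | nil => intro s; rfl
  | cons q rest ih =>
    intro s
    rw [List.foldl_cons, List.foldl_cons, ih]
    congr 1
    simp [PySem.Str.replace, String.toList_ofList]

lemma punctSet_contains (c : Char) : pvPunctSet.contains c = pvPunctuation.contains c := by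
  have h1 : pvPunctSet.contains c = true ↔ c ∈ pvPunctuation := by
    rw [PySem.Set.contains_iff]
    exact PySem.Set.mem_ofList _ _
  have h2 : pvPunctuation.contains c = true ↔ c ∈ pvPunctuation := List.contains_iff_mem
  cases hs : pvPunctSet.contains c <;> cases hl : pvPunctuation.contains c <;> simp_all

-- A's filter/length/index over words is the first match
lemma find?_getD (l : List String) (p : String → Bool) :
    (l.find? p).getD "" = (if (l.filter p).length > 0 then (PySem.List.pyGet? (l.filter p) 0).getD "" else "") := by
  rw [← List.head?_filter]
  cases h : l.filter p with
  | nil => simp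
  | cons a t => simp [PySem.List.pyGet?, PySem.List.pyIdx?]

-- A's string-side word test, read on char lists
lemma predS_ofList (w : List Char) :
    (!(String.ofList w == "") && !(PySem.Str.strIsspace (String.ofList w))) = pvIsWord w := by
  have h1 : (String.ofList w == "") = w.isEmpty := by
    cases hw : w.isEmpty
    · have : w ≠ [] := by cases w <;> simp_all
      simp only [beq_eq_false_iff_ne, ne_eq]
      intro hcon
      exact this (by simpa using congrArg String.toList hcon)
    · have : w = [] := by cases w <;> simp_all
      subst this; rfl
  rw [PySem.Str.strIsspace_eq, String.toList_ofList, pvIsWord, h1]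

-- ===== VERDICT (by name: the statement is the Claim_ definition above) =====
theorem getFirstWord_spec : Claim_equal_getFirstWord := by
  intro t _
  show getFirstWord t = getFirstWord_alt t
  apply String.toList_inj.mp
  -- names
  set l := t.toList with hl
  have hline : '\n' ∉ l.takeWhile (fun c => !(c == '\n')) := by
    intro hmem
    have := List.mem_takeWhile_imp hmem
    simp at this
  -- A side
  have hsplitNl : ((PySem.Str.split? t "\n").getD []).headD ""
      = String.ofList (l.takeWhile (fun c => !(c == '\n'))) := by
    have : PySem.Str.split? t "\n" = some ((PySem.Chars.splitOn l ['\n']).map String.ofList) := by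
      rw [PySem.Str.split?, show ("\n" : String).toList = ['\n'] from rfl, PySem.Chars.split?,
        if_neg (by simp)]
      rfl
    rw [this, Option.getD_some, splitOn_single]
    cases hS : List.splitOnP (fun c => c == '\n') l with
    | nil => exact absurd hS (List.splitOnP_ne_nil _ l)
    | cons hd tl =>
      have hhead : (List.splitOnP (fun c => c == '\n') l).headD [] = hd := by simp [hS]
      rw [splitOnP_headD] at hhead
      simp [← hhead]
  rw [getFirstWord]
  rw [hsplitNl]
  set line := l.takeWhile (fun c => !(c == '\n')) with hlinedef
  have hsplitSp : PySem.Str.split? (String.ofList line) " "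
      = some ((List.splitOnP (fun c => c == ' ') line).map String.ofList) := by
    rw [PySem.Str.split?, show (" " : String).toList = [' '] from rfl, PySem.Chars.split?,
      if_neg (by simp), String.toList_ofList, splitOn_single]
    rfl
  rw [foldl_strReplace, foldl_replace_eq_filter, hsplitSp, Option.getD_some]
  rw [← find?_getD]
  rw [List.find?_map]
  have hpred : ((fun w => !(w == "") && !(PySem.Str.strIsspace w)) ∘ String.ofList) = pvIsWord := by
    funext w
    exact predS_ofList w
  rw [hpred]
  have hgetD : ∀ (o : Option (List Char)), ((o.map String.ofList).getD "").toList = o.getD [] := by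
    intro o; cases o <;> simp
  rw [hgetD]
  -- B side
  rw [getFirstWord_alt]
  rw [show t.toList = l from rfl, scan_takeWhile l [] false, ← hlinedef]
  have hscan := scan_spec line [] hline
  simp only [List.any_nil] at hscan
  simp only [List.nil_append, pv_modifyHead_id] at hscan
  by_cases hf : (pvScanFirstWord line [] false).2 = true
  · rw [if_pos hf] at hscan ⊢
    rw [String.toList_ofList, ← hscan]
    apply List.filter_congr
    intro c _
    rw [punctSet_contains]
  · rw [if_neg hf] at hscan ⊢
    rw [← hscan]
    simp
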